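-- pv_equiv track=rewrite | github.com/Muhammedyilmaz56/server_client | server/crypto_algorithms.py | route_encrypt
-- ===== SOURCE A (Python) =====
-- def route_encrypt(text, cols, clockwise=True):
--     text = text.replace(" ", "").upper()
--     if not cols or cols <= 0:
--         return text
--     rows = (len(text) + cols - 1) // cols
--     matrix = [["X" for _ in range(cols)] for _ in range(rows)]
--     idx = 0
--     for r in range(rows):
--         for c in range(cols):
--             if idx < len(text):
--                 matrix[r][c] = text[idx]
--                 idx += 1
--
--     result = []
--     top, left = 0, 0
--     bottom, right = rows - 1, cols - 1
--
--     while top <= bottom and left <= right: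
--         for c in range(right, left - 1, -1):
--             result.append(matrix[top][c])
--         top += 1
--         for r in range(top, bottom + 1):
--             result.append(matrix[r][left])
--         left += 1
--         if top <= bottom:
--             for c in range(left, right + 1):
--                 result.append(matrix[bottom][c])
--             bottom -= 1
--         if left <= right:
--             for r in range(bottom, top - 1, -1):
--                 result.append(matrix[r][right])
--             right -= 1
--     return "".join(result)
-- ===== SOURCE B (Python) =====
-- def route_encrypt(text, cols, clockwise=True):
--     text = text.replace(" ", "").upper()
--     if not cols or cols <= 0:
--         return text
--     rows = (len(text) + cols - 1) // cols
--     matrix = [["X" for _ in range(cols)] for _ in range(rows)]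
--     idx = 0
--     for r in range(rows):
--         for c in range(cols):
--             if idx < len(text):
--                 matrix[r][c] = text[idx]
--                 idx += 1
--     # single direction-vector spiral walk: left, down, right, up
--     dirs = [(0, -1), (1, 0), (0, 1), (-1, 0)]
--     visited = set()
--     r, c, d = 0, cols - 1, 0
--     out = []
--     for _ in range(rows * cols):
--         out.append(matrix[r][c])
--         visited.add((r, c))
--         nr, nc = r + dirs[d][0], c + dirs[d][1]
--         if not (0 <= nr < rows and 0 <= nc < cols) or (nr, nc) in visited:
--             d = (d + 1) % 4
--             nr, nc = r + dirs[d][0], c + dirs[d][1]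
--         r, c = nr, nc
--     return "".join(out)
-- ===== Notes on version B (the rewrite author's own statement) =====
-- stated objective: alternative
-- what changed: The four-boundary shrinking while-loop over (top,left,bottom,right) is replaced by a single direction-vector walk: one for-loop over exactly rows*cols cells that keeps a current position, a direction index into [(0,-1),(1,0),(0,1),(-1,0)] and a visited set, rotating the direction when the next cell is out of bounds or visited.
import Mathlib
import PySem

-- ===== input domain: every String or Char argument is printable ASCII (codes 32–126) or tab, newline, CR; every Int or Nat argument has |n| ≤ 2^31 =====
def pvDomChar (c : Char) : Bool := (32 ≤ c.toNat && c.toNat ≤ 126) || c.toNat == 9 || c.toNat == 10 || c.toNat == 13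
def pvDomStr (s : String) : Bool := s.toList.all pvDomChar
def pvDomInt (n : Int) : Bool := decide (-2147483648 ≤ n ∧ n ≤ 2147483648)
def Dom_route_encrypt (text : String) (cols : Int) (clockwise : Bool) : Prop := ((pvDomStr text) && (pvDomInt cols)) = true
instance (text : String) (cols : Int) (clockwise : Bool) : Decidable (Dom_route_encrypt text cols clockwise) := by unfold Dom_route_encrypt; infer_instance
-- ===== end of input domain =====

-- B replaces A's four-boundary shrinking while-loop by a single direction-vector walk over
-- exactly rows*cols cells with a visited set (objective: alternative, same cost).
-- Both Pythons share the same prelude verbatim (strip spaces/upper, cols<=0 guard, rows,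
-- 'X'-filled matrix written row-major); it is factored into the helpers below, used by both ports.

-- matrix[r][c] — both programs only index inside the matrix, so the defaults are never read
def matAt (m : List (List Char)) (r c : Int) : Char :=
  PySem.List.pyGetD (PySem.List.pyGetD m r []) c 'X'

-- the shared prelude fill loop: matrix of "X", then matrix[r][c] = text[idx]; idx += 1 while idx < len(text)
def pyBuildMatrix (cs : List Char) (rows cols : Int) : List (List Char) :=
  let m0 := (PySem.List.pyRange 0 rows 1).map (fun _ => (PySem.List.pyRange 0 cols 1).map (fun _ => 'X'))
  ((PySem.List.pyRange 0 rows 1).foldl (fun (st : List (List Char) × Int) r =>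
      (PySem.List.pyRange 0 cols 1).foldl (fun (st : List (List Char) × Int) c =>
        if st.2 < (cs.length : Int) then
          (PySem.List.pySetD st.1 r
            (PySem.List.pySetD (PySem.List.pyGetD st.1 r []) c (PySem.List.pyGetD cs st.2 'X')),
           st.2 + 1)
        else st) st) (m0, 0)).1

-- ===== PORT A =====
-- the while-loop over the four shrinking boundaries; `res` is the accumulated result list
def spiralA (m : List (List Char)) (top left bottom right : Int) (res : List Char) : List Char :=
  if _h : top ≤ bottom ∧ left ≤ right then
    -- the four segments of one iteration, appended in order (a guarded segment is [] when
    -- its guard is false), then the loop continues on the shrunk boundaries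
    spiralA m (top + 1) (left + 1)
      (if top + 1 ≤ bottom then bottom - 1 else bottom)
      (if left + 1 ≤ right then right - 1 else right)
      ((((res ++ (PySem.List.pyRange right (left - 1) (-1)).map (fun c => matAt m top c))
          ++ (PySem.List.pyRange (top + 1) (bottom + 1) 1).map (fun r => matAt m r left))
          ++ (if top + 1 ≤ bottom then
                (PySem.List.pyRange (left + 1) (right + 1) 1).map (fun c => matAt m bottom c)
              else []))
          ++ (if left + 1 ≤ right then
                (PySem.List.pyRange (if top + 1 ≤ bottom then bottom - 1 else bottom)
                    ((top + 1) - 1) (-1)).map (fun r => matAt m r right)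
              else []))
  else res
termination_by ((bottom - top) + (right - left) + 2).toNat
decreasing_by split_ifs <;> omega

def route_encrypt (text : String) (cols : Int) (clockwise : Bool) : String :=
  let text2 := PySem.Str.upper (PySem.Str.replace text " " "")
  if cols = 0 ∨ cols ≤ 0 then text2
  else
    let cs := text2.toList
    let rows := PySem.Int.floordiv ((cs.length : Int) + cols - 1) cols
    let m := pyBuildMatrix cs rows cols
    -- "".join of the appended one-character strings = the string of those characters
    String.ofList (spiralA m 0 0 (rows - 1) (cols - 1) [])

-- ===== PORT B =====
def dirsB : List (Int × Int) := [(0, -1), (1, 0), (0, 1), (-1, 0)]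

-- the body of `for _ in range(rows*cols)`: emit, mark visited, step (rotating once if blocked)
def walkB (m : List (List Char)) (rows cols : Int) :
    Nat → PySem.Set (Int × Int) → Int → Int → Int → List Char → List Char
  | 0, _, _, _, _, out => out
  | n + 1, visited, r, c, d, out =>
    let out2 := out ++ [matAt m r c]
    let vis2 := PySem.Set.add visited (r, c)
    let nr := r + (PySem.List.pyGetD dirsB d ((0 : Int), (0 : Int))).1
    let nc := c + (PySem.List.pyGetD dirsB d ((0 : Int), (0 : Int))).2
    if ¬(0 ≤ nr ∧ nr < rows ∧ 0 ≤ nc ∧ nc < cols) ∨ (nr, nc) ∈ vis2 then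
      let d2 := PySem.Int.mod (d + 1) 4
      walkB m rows cols n vis2 (r + (PySem.List.pyGetD dirsB d2 ((0 : Int), (0 : Int))).1)
        (c + (PySem.List.pyGetD dirsB d2 ((0 : Int), (0 : Int))).2) d2 out2
    else walkB m rows cols n vis2 nr nc d out2

def route_encrypt_alt (text : String) (cols : Int) (clockwise : Bool) : String :=
  let text2 := PySem.Str.upper (PySem.Str.replace text " " "")
  if cols = 0 ∨ cols ≤ 0 then text2
  else
    let cs := text2.toList
    let rows := PySem.Int.floordiv ((cs.length : Int) + cols - 1) cols
    let m := pyBuildMatrix cs rows cols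
    -- range(rows*cols) iterates (rows*cols).toNat times (rows*cols ≥ 0 here)
    String.ofList (walkB m rows cols (rows * cols).toNat PySem.Set.empty 0 (cols - 1) 0 [])

-- ===== PRECONDITION & SPEC =====
def Spec_route_encrypt (text : String) (cols : Int) (clockwise : Bool) (out : String) : Prop := out = route_encrypt_alt text cols clockwise
instance (text : String) (cols : Int) (clockwise : Bool) (out : String) : Decidable (Spec_route_encrypt text cols clockwise out) := by unfold Spec_route_encrypt; infer_instance

-- ===== CLAIM (what is proved, stated in full; the proofs are below) =====
def Claim_equal_route_encrypt : Prop := ∀ (text : String) (cols : Int) (clockwise : Bool), Dom_route_encrypt text cols clockwise → Spec_route_encrypt text cols clockwise (route_encrypt text cols clockwise)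

-- ===== LEMMAS AND PROOFS =====

-- visited sets as Boolean functions (proof-side only)
def updV (V : (Int × Int) → Bool) (q : Int × Int) : (Int × Int) → Bool :=
  fun p => if p = q then true else V p

def updMany (V : (Int × Int) → Bool) (l : List (Int × Int)) : (Int × Int) → Bool :=
  l.foldl updV V

-- walkB with the visited set abstracted to its membership function
def walkF (m : List (List Char)) (rows cols : Int) :
    Nat → ((Int × Int) → Bool) → Int → Int → Int → List Char → List Char
  | 0, _, _, _, _, out => out
  | n + 1, V, r, c, d, out =>
    let out2 := out ++ [matAt m r c]
    let V2 := updV V (r, c)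
    let nr := r + (PySem.List.pyGetD dirsB d ((0 : Int), (0 : Int))).1
    let nc := c + (PySem.List.pyGetD dirsB d ((0 : Int), (0 : Int))).2
    if ¬(0 ≤ nr ∧ nr < rows ∧ 0 ≤ nc ∧ nc < cols) ∨ V2 (nr, nc) = true then
      let d2 := PySem.Int.mod (d + 1) 4
      walkF m rows cols n V2 (r + (PySem.List.pyGetD dirsB d2 ((0 : Int), (0 : Int))).1)
        (c + (PySem.List.pyGetD dirsB d2 ((0 : Int), (0 : Int))).2) d2 out2
    else walkF m rows cols n V2 nr nc d out2

theorem updMany_spec (l : List (Int × Int)) : ∀ (V : (Int × Int) → Bool) (p : Int × Int),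
    updMany V l p = true ↔ (V p = true ∨ p ∈ l) := by
  induction l with
  | nil => simp [updMany]
  | cons q l ih =>
    intro V p
    simp only [updMany, List.foldl_cons] at *
    rw [ih]
    by_cases h : p = q <;> simp [updV, h]

theorem memEqSet (s : PySem.Set (Int × Int)) (q : Int × Int) :
    (q ∈ s) = (PySem.Set.contains s q = true) :=
  propext (PySem.Set.contains_iff s q).symm

theorem walkB_eq_walkF (m : List (List Char)) (rows cols : Int) :
    ∀ (n : Nat) (vis : PySem.Set (Int × Int)) (r c d : Int) (out : List Char),
    walkB m rows cols n vis r c d out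
      = walkF m rows cols n (fun p => PySem.Set.contains vis p) r c d out := by
  intro n
  induction n with
  | zero => intro vis r c d out; rfl
  | succ n ih =>
    intro vis r c d out
    have hfun : (fun p => PySem.Set.contains (PySem.Set.add vis (r, c)) p)
        = updV (fun p => PySem.Set.contains vis p) (r, c) := by
      funext p
      by_cases h : p = (r, c)
      · subst h
        simp [updV]
      · simp only [updV, if_neg h]
        rw [Bool.eq_iff_iff, PySem.Set.contains_iff, PySem.Set.contains_iff, PySem.Set.mem_add]
        constructor
        · rintro (hm | he)
          · exact hm
          · exact absurd he h
        · exact Or.inl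
    have hpt : ∀ q, (PySem.Set.contains (PySem.Set.add vis (r, c)) q)
        = updV (fun p => PySem.Set.contains vis p) (r, c) q := fun q => congrFun hfun q
    simp only [walkB, walkF, ih, memEqSet, hpt]


theorem dirs_at_0 : PySem.List.pyGetD dirsB 0 ((0:Int),(0:Int)) = (0, -1) := by decide
theorem dirs_at_1 : PySem.List.pyGetD dirsB 1 ((0:Int),(0:Int)) = (1, 0) := by decide
theorem dirs_at_2 : PySem.List.pyGetD dirsB 2 ((0:Int),(0:Int)) = (0, 1) := by decide
theorem dirs_at_3 : PySem.List.pyGetD dirsB 3 ((0:Int),(0:Int)) = (-1, 0) := by decide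
theorem mod4_0 : PySem.Int.mod (0+1) 4 = 1 := by decide
theorem mod4_1 : PySem.Int.mod (1+1) 4 = 2 := by decide
theorem mod4_2 : PySem.Int.mod (2+1) 4 = 3 := by decide
theorem mod4_3 : PySem.Int.mod (3+1) 4 = 0 := by decide

theorem step_turn (m : List (List Char)) (rows cols : Int) (n : Nat) (V : (Int × Int) → Bool)
    (r c d : Int) (out : List Char) (dr dc dr2 dc2 : Int)
    (hd : PySem.List.pyGetD dirsB d ((0:Int),(0:Int)) = (dr, dc))
    (hd2 : PySem.List.pyGetD dirsB (PySem.Int.mod (d+1) 4) ((0:Int),(0:Int)) = (dr2, dc2))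
    (hblock : ¬(0 ≤ r + dr ∧ r + dr < rows ∧ 0 ≤ c + dc ∧ c + dc < cols)
      ∨ (r + dr, c + dc) = (r, c) ∨ V (r + dr, c + dc) = true) :
    walkF m rows cols (n + 1) V r c d out
      = walkF m rows cols n (updV V (r, c)) (r + dr2) (c + dc2) (PySem.Int.mod (d+1) 4)
          (out ++ [matAt m r c]) := by
  simp only [walkF, hd, hd2]
  rw [if_pos]
  rcases hblock with h | h | h
  · exact Or.inl h
  · right; simp [updV, h]
  · right; simp only [updV]
    by_cases he : (r + dr, c + dc) = (r, c) <;> simp [he, h]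

theorem step_free (m : List (List Char)) (rows cols : Int) (n : Nat) (V : (Int × Int) → Bool)
    (r c d : Int) (out : List Char) (dr dc : Int)
    (hd : PySem.List.pyGetD dirsB d ((0:Int),(0:Int)) = (dr, dc))
    (hin : 0 ≤ r + dr ∧ r + dr < rows ∧ 0 ≤ c + dc ∧ c + dc < cols)
    (hne : (r + dr, c + dc) ≠ (r, c)) (hV : V (r + dr, c + dc) = false) :
    walkF m rows cols (n + 1) V r c d out
      = walkF m rows cols n (updV V (r, c)) (r + dr) (c + dc) d (out ++ [matAt m r c]) := by
  simp only [walkF, hd]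
  rw [if_neg]
  rintro (h | h)
  · exact h hin
  · simp only [updV, if_neg hne, hV] at h
    exact Bool.false_ne_true h

theorem pyRange_neg_one_split (a b : Int) (h : b ≤ a) :
    PySem.List.pyRange a (b - 1) (-1) = PySem.List.pyRange a b (-1) ++ [b] := by
  rw [PySem.List.pyRange_neg_one_eq_reverse, PySem.List.pyRange_neg_one_eq_reverse]
  rw [show b - 1 + 1 = b by ring]
  rw [PySem.List.pyRange_one_cons (by omega : b < a + 1)]
  simp

theorem run_straight (m : List (List Char)) (rows cols : Int) (dr dc d : Int)
    (hd : PySem.List.pyGetD dirsB d ((0:Int),(0:Int)) = (dr, dc))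
    (hdir : dr ≠ 0 ∨ dc ≠ 0) :
    ∀ (k : Nat) (n : Nat) (V : (Int × Int) → Bool) (r c : Int) (out : List Char),
    (∀ j : Nat, j < k →
        (0 ≤ r + ((j : Int) + 1) * dr ∧ r + ((j : Int) + 1) * dr < rows ∧
         0 ≤ c + ((j : Int) + 1) * dc ∧ c + ((j : Int) + 1) * dc < cols) ∧
        V (r + ((j : Int) + 1) * dr, c + ((j : Int) + 1) * dc) = false) →
    walkF m rows cols (n + k) V r c d out
      = walkF m rows cols n
          (updMany V ((List.range k).map (fun (j : Nat) => ((r + (j : Int) * dr, c + (j : Int) * dc) : Int × Int))))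
          (r + (k : Int) * dr) (c + (k : Int) * dc) d
          (out ++ (List.range k).map (fun (j : Nat) => matAt m (r + (j : Int) * dr) (c + (j : Int) * dc))) := by
  intro k
  induction k with
  | zero => intro n V r c out hfree; simp [updMany]
  | succ k ih =>
    intro n V r c out hfree
    have h0 := hfree 0 (Nat.succ_pos k)
    simp only [Nat.cast_zero, zero_add, one_mul] at h0
    have hne : (r + dr, c + dc) ≠ (r, c) := by
      intro he
      have h1 : r + dr = r := congrArg Prod.fst he
      have h2 : c + dc = c := congrArg Prod.snd he
      rcases hdir with h | h <;> omega
    have hstep := step_free m rows cols (n + k) V r c d out dr dc hd h0.1 hne h0.2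
    rw [show n + (k + 1) = (n + k) + 1 from rfl, hstep]
    have hfree' : ∀ j : Nat, j < k →
        (0 ≤ r + dr + ((j : Int) + 1) * dr ∧ r + dr + ((j : Int) + 1) * dr < rows ∧
         0 ≤ c + dc + ((j : Int) + 1) * dc ∧ c + dc + ((j : Int) + 1) * dc < cols) ∧
        (updV V (r, c)) (r + dr + ((j : Int) + 1) * dr, c + dc + ((j : Int) + 1) * dc) = false := by
      intro j hj
      have h1 := hfree (j + 1) (by omega)
      push_cast at h1
      have e1 : r + dr + ((j : Int) + 1) * dr = r + ((j : Int) + 1 + 1) * dr := by ring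
      have e2 : c + dc + ((j : Int) + 1) * dc = c + ((j : Int) + 1 + 1) * dc := by ring
      rw [e1, e2]
      refine ⟨h1.1, ?_⟩
      simp only [updV]
      rw [if_neg, h1.2]
      intro he
      have g1 : r + ((j : Int) + 1 + 1) * dr = r := congrArg Prod.fst he
      have g2 : c + ((j : Int) + 1 + 1) * dc = c := congrArg Prod.snd he
      have hj2 : ((j : Int) + 1 + 1) ≠ 0 := by omega
      rcases hdir with h | h
      · exact h (by
          have hP : ((j : Int) + 1 + 1) * dr = 0 := by linarith
          rcases mul_eq_zero.mp hP with h' | h'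
          · exact absurd h' hj2
          · exact h')
      · exact h (by
          have hP : ((j : Int) + 1 + 1) * dc = 0 := by linarith
          rcases mul_eq_zero.mp hP with h' | h'
          · exact absurd h' hj2
          · exact h')
    rw [ih n (updV V (r, c)) (r + dr) (c + dc) (out ++ [matAt m r c]) hfree']
    have hV2 : updMany V ((List.range (k + 1)).map
          (fun (j : Nat) => ((r + (j : Int) * dr, c + (j : Int) * dc) : Int × Int)))
        = updMany (updV V (r, c)) ((List.range k).map
          (fun (j : Nat) => ((r + dr + (j : Int) * dr, c + dc + (j : Int) * dc) : Int × Int))) := by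
      rw [List.range_succ_eq_map]
      simp only [List.map_cons, Nat.cast_zero, zero_mul, add_zero, List.map_map]
      show updMany V (_ :: _) = _
      rw [updMany, List.foldl_cons]
      show updMany (updV V (r, c)) _ = _
      congr 1
      apply List.map_congr_left
      intro j hj
      simp only [Function.comp]
      have : ((j + 1 : Nat) : Int) = (j : Int) + 1 := by push_cast; ring
      rw [this, Prod.mk.injEq]
      constructor <;> ring
    have hout : (out ++ [matAt m r c]) ++ (List.range k).map
          (fun (j : Nat) => matAt m (r + dr + (j : Int) * dr) (c + dc + (j : Int) * dc))
        = out ++ (List.range (k + 1)).map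
          (fun (j : Nat) => matAt m (r + (j : Int) * dr) (c + (j : Int) * dc)) := by
      rw [List.range_succ_eq_map]
      simp only [List.map_cons, Nat.cast_zero, zero_mul, add_zero, List.map_map,
        List.append_assoc, List.singleton_append]
      congr 1
      congr 1
      apply List.map_congr_left
      intro j hj
      simp only [Function.comp]
      congr 1 <;> push_cast <;> ring
    rw [hV2, hout]
    have hp1 : r + dr + (k : Int) * dr = r + ((k + 1 : Nat) : Int) * dr := by push_cast; ring
    have hp2 : c + dc + (k : Int) * dc = c + ((k + 1 : Nat) : Int) * dc := by push_cast; ring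
    rw [hp1, hp2]


theorem updV_spec (V : (Int × Int) → Bool) (q p : Int × Int) :
    updV V q p = true ↔ (p = q ∨ V p = true) := by
  simp only [updV]; by_cases h : p = q <;> simp [h]

theorem ringLemma (m : List (List Char)) (rows cols : Int) :
    ∀ (hw : Nat), ∀ (h w : Nat) (top left : Int) (V : (Int × Int) → Bool) (acc : List Char),
    h + w ≤ hw → 0 ≤ top → 0 ≤ left → top + (h : Int) < rows → left + (w : Int) < cols →
    (∀ p : Int × Int, V p = true ↔
      ((0 ≤ p.1 ∧ p.1 < rows ∧ 0 ≤ p.2 ∧ p.2 < cols) ∧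
       ¬(top ≤ p.1 ∧ p.1 ≤ top + (h : Int) ∧ left ≤ p.2 ∧ p.2 ≤ left + (w : Int)))) →
    walkF m rows cols ((h + 1) * (w + 1)) V top (left + (w : Int)) 0 acc
      = spiralA m top left (top + (h : Int)) (left + (w : Int)) acc := by
  intro hw
  induction hw using Nat.strong_induction_on with
  | _ hw ih =>
  intro h w top left V acc hhw htop hleft hrows hcols hV
  -- ··· stage 1: walk leftward along the top row, k = w cells, stopping at (top, left)
  have hfree1 : ∀ j : Nat, j < w →
      (0 ≤ top + ((j : Int) + 1) * 0 ∧ top + ((j : Int) + 1) * 0 < rows ∧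
       0 ≤ left + (w : Int) + ((j : Int) + 1) * (-1) ∧ left + (w : Int) + ((j : Int) + 1) * (-1) < cols) ∧
      V (top + ((j : Int) + 1) * 0, left + (w : Int) + ((j : Int) + 1) * (-1)) = false := by
    intro j hj
    refine ⟨by constructor <;> [skip; constructor] <;> [omega; omega; constructor <;> omega], ?_⟩
    rw [Bool.eq_false_iff]
    intro hVt
    rw [hV] at hVt
    simp only [mul_zero, add_zero, mul_neg_one] at hVt
    omega
  have hrun1 := run_straight m rows cols 0 (-1) 0 dirs_at_0 (Or.inr (by norm_num))
      w (h * (w + 1) + 1) V top (left + (w : Int)) acc hfree1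
  rw [show (h + 1) * (w + 1) = (h * (w + 1) + 1) + w by ring, hrun1,
      show (top : Int) + (w : Int) * 0 = top by ring,
      show (left + (w : Int)) + (w : Int) * (-1) = left by ring]
  -- the visited function after stage 1 and its emitted cells
  set path1 := (List.range w).map
      (fun (j : Nat) => ((top + (j : Int) * 0, left + (w : Int) + (j : Int) * (-1)) : Int × Int)) with hpath1
  set A1 := (List.range w).map
      (fun (j : Nat) => matAt m (top + (j : Int) * 0) (left + (w : Int) + (j : Int) * (-1))) with hA1
  -- ··· corner (top, left): next (top, left-1) blocked, rotate to direction 1 (down)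
  have hblock1 : ¬(0 ≤ top + 0 ∧ top + 0 < rows ∧ 0 ≤ left + (-1) ∧ left + (-1) < cols)
      ∨ ((top + 0, left + (-1)) : Int × Int) = (top, left)
      ∨ updMany V path1 (top + 0, left + (-1)) = true := by
    by_cases hl0 : 0 ≤ left - 1
    · refine Or.inr (Or.inr ?_)
      rw [updMany_spec]
      refine Or.inl ?_
      rw [hV]
      constructor
      · constructor <;> [omega; constructor <;> [omega; constructor <;> omega]]
      · intro hr; omega
    · exact Or.inl (by intro hb; omega)
  have hcorner1 := step_turn m rows cols (h * (w + 1)) (updMany V path1) top left 0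
      (acc ++ A1) 0 (-1) 1 0 dirs_at_0 (by rw [mod4_0]; exact dirs_at_1) hblock1
  rw [hcorner1, mod4_0,
      show (top : Int) + 1 = top + 1 from rfl, show (left : Int) + 0 = left by ring]
  -- characterisation of the visited function after the top row is done
  have hC1 : ∀ p : Int × Int, updV (updMany V path1) (top, left) p = true ↔
      ((0 ≤ p.1 ∧ p.1 < rows ∧ 0 ≤ p.2 ∧ p.2 < cols) ∧
       (¬(top ≤ p.1 ∧ p.1 ≤ top + (h : Int) ∧ left ≤ p.2 ∧ p.2 ≤ left + (w : Int)) ∨ p.1 = top)) := by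
    intro p
    obtain ⟨p1, p2⟩ := p
    rw [updV_spec, updMany_spec, hV]
    simp only [hpath1, List.mem_map, List.mem_range, Prod.mk.injEq, mul_zero, add_zero, mul_neg_one]
    constructor
    · rintro (heq | ⟨hg, hr⟩ | ⟨j, hj, he1, he2⟩)
      · obtain ⟨e1, e2⟩ := heq
        refine ⟨by omega, Or.inr (by omega)⟩
      · exact ⟨hg, Or.inl hr⟩
      · refine ⟨by omega, Or.inr (by omega)⟩
    · rintro ⟨hg, hr | he⟩
      · exact Or.inr (Or.inl ⟨hg, hr⟩)
      · by_cases hrect : top ≤ p1 ∧ p1 ≤ top + (h : Int) ∧ left ≤ p2 ∧ p2 ≤ left + (w : Int)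
        · by_cases hp2 : p2 = left
          · exact Or.inl ⟨he, hp2⟩
          · exact Or.inr (Or.inr ⟨(left + (w : Int) - p2).toNat, by omega, by omega, by omega⟩)
        · exact Or.inr (Or.inl ⟨hg, hrect⟩)
  set V2 := updV (updMany V path1) (top, left) with hV2def
  -- ··· case split on the height of the ring
  cases h with
  | zero =>
    -- single row: fuel is exhausted right after the top row; A's loop also stops after it
    rw [show (0 : Nat) * (w + 1) = 0 by ring]
    rw [show walkF m rows cols 0 V2 (top + 1) left 1 ((acc ++ A1) ++ [matAt m top left])
          = (acc ++ A1) ++ [matAt m top left] from rfl]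
    rw [spiralA]
    rw [dif_pos (show top ≤ top + ((0 : Nat) : Int) ∧ left ≤ left + ((w : Nat) : Int) from
      ⟨by omega, by omega⟩)]
    simp only [if_neg (show ¬ top + 1 ≤ top + ((0 : Nat) : Int) by omega)]
    simp only [Nat.cast_zero, add_zero, add_sub_cancel_right,
      PySem.List.pyRange_neg_one_eq_nil (le_refl top),
      PySem.List.pyRange_one_eq_nil (le_refl (top + 1)),
      List.map_nil, List.append_nil, ite_self]
    rw [spiralA]
    rw [dif_neg (show ¬ (top + 1 ≤ top ∧ left + 1 ≤
        (if left + 1 ≤ left + ((w : Nat) : Int) then left + ((w : Nat) : Int) - 1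
         else left + ((w : Nat) : Int))) from by rintro ⟨hx, _⟩; omega)]
    rw [pyRange_neg_one_split (left + (w : Int)) left (by omega), List.map_append]
    have hseg : (PySem.List.pyRange (left + (w : Int)) left (-1)).map (fun c => matAt m top c)
        = A1 := by
      rw [PySem.List.pyRange_neg_one, show left + (w : Int) - left = ((w : Nat) : Int) by ring,
        Int.toNat_natCast, List.map_map, hA1]
      apply List.map_congr_left
      intro j hj
      simp only [Function.comp]
      congr 1 <;> ring
    rw [hseg]
    simp [List.append_assoc]
  | succ hh =>
    -- ··· stage 2: walk down the left column, stopping at (top+h, left)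
    rw [show (hh + 1) * (w + 1) = (((hh + 1) * w + 1) + hh) by ring]
    have hfree2 : ∀ j : Nat, j < hh →
        (0 ≤ top + 1 + ((j : Int) + 1) * 1 ∧ top + 1 + ((j : Int) + 1) * 1 < rows ∧
         0 ≤ left + ((j : Int) + 1) * 0 ∧ left + ((j : Int) + 1) * 0 < cols) ∧
        V2 (top + 1 + ((j : Int) + 1) * 1, left + ((j : Int) + 1) * 0) = false := by
      intro j hj
      simp only [mul_one, mul_zero, add_zero]
      refine ⟨⟨by omega, by omega, by omega, by omega⟩, ?_⟩
      rw [Bool.eq_false_iff]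
      intro hVt
      rw [hC1] at hVt
      simp only at hVt
      omega
    have hrun2 := run_straight m rows cols 1 0 1 dirs_at_1 (Or.inl one_ne_zero)
        hh ((hh + 1) * w + 1) V2 (top + 1) left ((acc ++ A1) ++ [matAt m top left]) hfree2
    rw [hrun2, show (top : Int) + 1 + (hh : Int) * 1 = top + (hh : Int) + 1 by ring,
        show (left : Int) + (hh : Int) * 0 = left by ring]
    set path2 := (List.range hh).map
        (fun (j : Nat) => ((top + 1 + (j : Int) * 1, left + (j : Int) * 0) : Int × Int)) with hpath2
    set A2 := (List.range hh).map
        (fun (j : Nat) => matAt m (top + 1 + (j : Int) * 1) (left + (j : Int) * 0)) with hA2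
    -- ··· corner (top+h, left): next (top+h+1, left) blocked, rotate to direction 2 (right)
    have hblock2 : ¬(0 ≤ top + (hh : Int) + 1 + 1 ∧ top + (hh : Int) + 1 + 1 < rows ∧
          0 ≤ left + 0 ∧ left + 0 < cols)
        ∨ ((top + (hh : Int) + 1 + 1, left + 0) : Int × Int) = (top + (hh : Int) + 1, left)
        ∨ updMany V2 path2 (top + (hh : Int) + 1 + 1, left + 0) = true := by
      by_cases hb : top + (hh : Int) + 1 + 1 < rows
      · refine Or.inr (Or.inr ?_)
        rw [updMany_spec]
        refine Or.inl ?_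
        rw [hC1]
        exact ⟨⟨by omega, by omega, by omega, by omega⟩, Or.inl (by intro hr; omega)⟩
      · exact Or.inl (by rintro ⟨_, h2, _, _⟩; exact hb h2)
    have hcorner2 := step_turn m rows cols ((hh + 1) * w) (updMany V2 path2)
        (top + (hh : Int) + 1) left 1 (((acc ++ A1) ++ [matAt m top left]) ++ A2) 1 0 0 1
        dirs_at_1 (by rw [mod4_1]; exact dirs_at_2) hblock2
    rw [hcorner2, mod4_1, show (top + (hh : Int) + 1 : Int) + 0 = top + (hh : Int) + 1 by ring]
    set V4 := updV (updMany V2 path2) (top + (hh : Int) + 1, left) with hV4def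
    -- characterisation after the left column is done
    have hC2 : ∀ p : Int × Int, V4 p = true ↔
        ((0 ≤ p.1 ∧ p.1 < rows ∧ 0 ≤ p.2 ∧ p.2 < cols) ∧
         (¬(top ≤ p.1 ∧ p.1 ≤ top + ((hh + 1 : Nat) : Int) ∧ left ≤ p.2 ∧ p.2 ≤ left + (w : Int))
          ∨ p.1 = top ∨ p.2 = left)) := by
      intro p
      obtain ⟨p1, p2⟩ := p
      rw [hV4def, updV_spec, updMany_spec, hC1]
      simp only [hpath2, List.mem_map, List.mem_range, Prod.mk.injEq, mul_one, mul_zero, add_zero]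
      constructor
      · rintro (⟨e1, e2⟩ | ⟨hg, hr | he⟩ | ⟨j, hj, he1, he2⟩)
        · exact ⟨by omega, Or.inr (Or.inr (by omega))⟩
        · exact ⟨hg, Or.inl (by intro hr2; exact hr (by omega))⟩
        · exact ⟨hg, Or.inr (Or.inl he)⟩
        · exact ⟨by omega, Or.inr (Or.inr (by omega))⟩
      · rintro ⟨hg, hr | he | he⟩
        · exact Or.inr (Or.inl ⟨hg, Or.inl (by intro hr2; exact hr (by omega))⟩)
        · exact Or.inr (Or.inl ⟨hg, Or.inr he⟩)
        · by_cases hrect : top ≤ p1 ∧ p1 ≤ top + ((hh + 1 : Nat) : Int) ∧ left ≤ p2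
              ∧ p2 ≤ left + (w : Int)
          · by_cases hp1 : p1 = top + (hh : Int) + 1
            · exact Or.inl ⟨hp1, he⟩
            · by_cases hp1t : p1 = top
              · exact Or.inr (Or.inl ⟨hg, Or.inr hp1t⟩)
              · exact Or.inr (Or.inr ⟨(p1 - top - 1).toNat, by omega, by omega, by omega⟩)
          · exact Or.inr (Or.inl ⟨hg, Or.inl (by intro hr2; exact hrect (by omega))⟩)
    -- ··· case split on the width of the ring
    cases w with
    | zero =>
      -- single column: fuel is exhausted after the left column
      rw [show (hh + 1) * 0 = 0 by ring]
      rw [show walkF m rows cols 0 V4 (top + (hh : Int) + 1) (left + 1) 2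
            ((((acc ++ A1) ++ [matAt m top left]) ++ A2) ++ [matAt m (top + (hh : Int) + 1) left])
            = (((acc ++ A1) ++ [matAt m top left]) ++ A2) ++ [matAt m (top + (hh : Int) + 1) left]
            from rfl]
      rw [spiralA]
      rw [dif_pos (show top ≤ top + ((hh + 1 : Nat) : Int) ∧ left ≤ left + ((0 : Nat) : Int) from
        ⟨by omega, by omega⟩)]
      simp only [if_pos (show top + 1 ≤ top + ((hh + 1 : Nat) : Int) by omega),
        if_neg (show ¬ left + 1 ≤ left + ((0 : Nat) : Int) by omega)]
      simp only [Nat.cast_zero, add_zero,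
        PySem.List.pyRange_one_eq_nil (le_refl (left + 1)),
        List.map_nil, List.append_nil]
      rw [spiralA]
      rw [dif_neg (show ¬ (top + 1 ≤ top + ((hh + 1 : Nat) : Int) - 1 ∧ left + 1 ≤ left) from
        by rintro ⟨_, hx⟩; omega)]
      rw [PySem.List.pyRange_neg_one_cons (by omega : left - 1 < left),
        PySem.List.pyRange_neg_one_eq_nil (by omega : left - 1 ≤ left - 1)]
      rw [show top + ((hh + 1 : Nat) : Int) + 1 = (top + (hh : Int) + 1) + 1 by push_cast; ring]
      rw [PySem.List.pyRange_one_succ_right (by omega : top + 1 ≤ top + (hh : Int) + 1),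
        List.map_append]
      have hseg2 : (PySem.List.pyRange (top + 1) (top + (hh : Int) + 1) 1).map
          (fun r => matAt m r left) = A2 := by
        rw [PySem.List.pyRange_one, show top + (hh : Int) + 1 - (top + 1) = ((hh : Nat) : Int) by ring,
          Int.toNat_natCast, List.map_map, hA2]
        apply List.map_congr_left
        intro j hj
        simp only [Function.comp]
        congr 1 <;> ring
      rw [hseg2, hA1]
      simp [List.append_assoc]
    | succ ww =>
      -- ··· stage 3: walk right along the bottom row, stopping at (top+h, left+w)
      rw [show (hh + 1) * (ww + 1) = ((hh * (ww + 1) + 1) + ww) by ring]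
      have hfree3 : ∀ j : Nat, j < ww →
          (0 ≤ top + (hh : Int) + 1 + ((j : Int) + 1) * 0 ∧
           top + (hh : Int) + 1 + ((j : Int) + 1) * 0 < rows ∧
           0 ≤ left + 1 + ((j : Int) + 1) * 1 ∧ left + 1 + ((j : Int) + 1) * 1 < cols) ∧
          V4 (top + (hh : Int) + 1 + ((j : Int) + 1) * 0, left + 1 + ((j : Int) + 1) * 1) = false := by
        intro j hj
        simp only [mul_one, mul_zero, add_zero]
        refine ⟨⟨by omega, by omega, by omega, by omega⟩, ?_⟩
        rw [Bool.eq_false_iff]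
        intro hVt
        rw [hC2] at hVt
        simp only at hVt
        omega
      have hrun3 := run_straight m rows cols 0 1 2 dirs_at_2 (Or.inr one_ne_zero)
          ww (hh * (ww + 1) + 1) V4 (top + (hh : Int) + 1) (left + 1)
          ((((acc ++ A1) ++ [matAt m top left]) ++ A2) ++ [matAt m (top + (hh : Int) + 1) left])
          hfree3
      rw [hrun3, show (top + (hh : Int) + 1 : Int) + (ww : Int) * 0 = top + (hh : Int) + 1 by ring,
          show (left : Int) + 1 + (ww : Int) * 1 = left + (ww : Int) + 1 by ring]
      set path3 := (List.range ww).map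
          (fun (j : Nat) => ((top + (hh : Int) + 1 + (j : Int) * 0, left + 1 + (j : Int) * 1)
            : Int × Int)) with hpath3
      set A3 := (List.range ww).map
          (fun (j : Nat) => matAt m (top + (hh : Int) + 1 + (j : Int) * 0)
            (left + 1 + (j : Int) * 1)) with hA3
      -- ··· corner (top+h, left+w): next (top+h, left+w+1) blocked, rotate to direction 3 (up)
      have hblock3 : ¬(0 ≤ top + (hh : Int) + 1 + 0 ∧ top + (hh : Int) + 1 + 0 < rows ∧
            0 ≤ left + (ww : Int) + 1 + 1 ∧ left + (ww : Int) + 1 + 1 < cols)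
          ∨ ((top + (hh : Int) + 1 + 0, left + (ww : Int) + 1 + 1) : Int × Int)
              = (top + (hh : Int) + 1, left + (ww : Int) + 1)
          ∨ updMany V4 path3 (top + (hh : Int) + 1 + 0, left + (ww : Int) + 1 + 1) = true := by
        by_cases hb : left + (ww : Int) + 1 + 1 < cols
        · refine Or.inr (Or.inr ?_)
          rw [updMany_spec]
          refine Or.inl ?_
          rw [hC2]
          exact ⟨⟨by omega, by omega, by omega, by omega⟩, Or.inl (by intro hr; omega)⟩
        · exact Or.inl (by rintro ⟨_, _, _, h4⟩; exact hb h4)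
      have hcorner3 := step_turn m rows cols (hh * (ww + 1)) (updMany V4 path3)
          (top + (hh : Int) + 1) (left + (ww : Int) + 1) 2
          (((((acc ++ A1) ++ [matAt m top left]) ++ A2) ++ [matAt m (top + (hh : Int) + 1) left])
            ++ A3) 0 1 (-1) 0 dirs_at_2 (by rw [mod4_2]; exact dirs_at_3) hblock3
      rw [hcorner3, mod4_2,
          show (top + (hh : Int) + 1 : Int) + -1 = top + (hh : Int) by ring,
          show (left + (ww : Int) + 1 : Int) + 0 = left + (ww : Int) + 1 by ring]
      set V6 := updV (updMany V4 path3) (top + (hh : Int) + 1, left + (ww : Int) + 1) with hV6def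
      -- characterisation after the bottom row is done
      have hC3 : ∀ p : Int × Int, V6 p = true ↔
          ((0 ≤ p.1 ∧ p.1 < rows ∧ 0 ≤ p.2 ∧ p.2 < cols) ∧
           (¬(top ≤ p.1 ∧ p.1 ≤ top + ((hh + 1 : Nat) : Int) ∧ left ≤ p.2
              ∧ p.2 ≤ left + ((ww + 1 : Nat) : Int))
            ∨ p.1 = top ∨ p.2 = left ∨ p.1 = top + (hh : Int) + 1)) := by
        intro p
        obtain ⟨p1, p2⟩ := p
        rw [hV6def, updV_spec, updMany_spec, hC2]
        simp only [hpath3, List.mem_map, List.mem_range, Prod.mk.injEq, mul_one, mul_zero, add_zero]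
        constructor
        · rintro (⟨e1, e2⟩ | ⟨hg, hr | he | he⟩ | ⟨j, hj, he1, he2⟩)
          · exact ⟨by omega, Or.inr (Or.inr (Or.inr (by omega)))⟩
          · exact ⟨hg, Or.inl (by intro hr2; exact hr (by omega))⟩
          · exact ⟨hg, Or.inr (Or.inl he)⟩
          · exact ⟨hg, Or.inr (Or.inr (Or.inl he))⟩
          · exact ⟨by omega, Or.inr (Or.inr (Or.inr (by omega)))⟩
        · rintro ⟨hg, hr | he | he | he⟩
          · exact Or.inr (Or.inl ⟨hg, Or.inl (by intro hr2; exact hr (by omega))⟩)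
          · exact Or.inr (Or.inl ⟨hg, Or.inr (Or.inl he)⟩)
          · exact Or.inr (Or.inl ⟨hg, Or.inr (Or.inr he)⟩)
          · by_cases hrect : top ≤ p1 ∧ p1 ≤ top + ((hh + 1 : Nat) : Int) ∧ left ≤ p2
                ∧ p2 ≤ left + ((ww + 1 : Nat) : Int)
            · by_cases hp2c : p2 = left + (ww : Int) + 1
              · exact Or.inl ⟨he, hp2c⟩
              · by_cases hp2l : p2 = left
                · exact Or.inr (Or.inl ⟨hg, Or.inr (Or.inr hp2l)⟩)
                · exact Or.inr (Or.inr ⟨(p2 - left - 1).toNat, by omega, by omega, by omega⟩)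
            · exact Or.inr (Or.inl ⟨hg, Or.inl (by intro hr2; exact hrect (by omega))⟩)
      cases hh with
      | zero =>
        -- two rows: fuel is exhausted after the bottom row
        rw [show (0 : Nat) * (ww + 1) = 0 by ring]
        rw [show ∀ out : List Char, walkF m rows cols 0 V6 (top + ((0 : Nat) : Int))
              (left + (ww : Int) + 1) 3 out = out from fun _ => rfl]
        rw [spiralA]
        rw [dif_pos (show top ≤ top + ((0 + 1 : Nat) : Int) ∧ left ≤ left + ((ww + 1 : Nat) : Int)
          from ⟨by omega, by omega⟩)]
        simp only [if_pos (show top + 1 ≤ top + ((0 + 1 : Nat) : Int) by omega),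
          if_pos (show left + 1 ≤ left + ((ww + 1 : Nat) : Int) by omega)]
        rw [show (top + ((0 + 1 : Nat) : Int) - 1 : Int) = top by push_cast; ring,
            show ((top : Int) + 1 - 1) = top by ring,
            PySem.List.pyRange_neg_one_eq_nil (le_refl top), List.map_nil]
        rw [spiralA]
        rw [dif_neg (show ¬ (top + 1 ≤ top ∧ left + 1 ≤ left + ((ww + 1 : Nat) : Int) - 1) from
          by rintro ⟨hx, _⟩; omega)]
        rw [pyRange_neg_one_split (left + ((ww + 1 : Nat) : Int)) left (by omega), List.map_append]
        have hseg1 : (PySem.List.pyRange (left + ((ww + 1 : Nat) : Int)) left (-1)).map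
            (fun c => matAt m top c) = A1 := by
          rw [PySem.List.pyRange_neg_one,
            show left + ((ww + 1 : Nat) : Int) - left = ((ww + 1 : Nat) : Int) by ring,
            Int.toNat_natCast, List.map_map, hA1]
          apply List.map_congr_left
          intro j hj
          simp only [Function.comp]
          congr 1 <;> ring
        rw [hseg1]
        rw [show (top : Int) + ((0 + 1 : Nat) : Int) + 1 = (top + 1) + 1 by push_cast; ring,
            PySem.List.pyRange_one_singleton (top + 1)]
        rw [show left + ((ww + 1 : Nat) : Int) + 1 = (left + (ww : Int) + 1) + 1 by push_cast; ring,
            PySem.List.pyRange_one_succ_right (by omega : left + 1 ≤ left + (ww : Int) + 1),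
            List.map_append]
        have hseg3 : (PySem.List.pyRange (left + 1) (left + (ww : Int) + 1) 1).map
            (fun c => matAt m (top + ((0 + 1 : Nat) : Int)) c) = A3 := by
          rw [PySem.List.pyRange_one,
            show left + (ww : Int) + 1 - (left + 1) = ((ww : Nat) : Int) by ring,
            Int.toNat_natCast, List.map_map, hA3]
          apply List.map_congr_left
          intro j hj
          simp only [Function.comp]
          congr 1 <;> push_cast <;> ring
        rw [hseg3, hA2]
        push_cast
        simp [List.append_assoc]
      | succ h2 =>
        -- ··· stage 4: walk up the right column, stopping at (top+1, left+w)
        rw [show (h2 + 1) * (ww + 1) = (((h2 + 1) * ww + 1) + h2) by ring]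
        have hfree4 : ∀ j : Nat, j < h2 →
            (0 ≤ top + ((h2 + 1 : Nat) : Int) + ((j : Int) + 1) * (-1) ∧
             top + ((h2 + 1 : Nat) : Int) + ((j : Int) + 1) * (-1) < rows ∧
             0 ≤ left + (ww : Int) + 1 + ((j : Int) + 1) * 0 ∧
             left + (ww : Int) + 1 + ((j : Int) + 1) * 0 < cols) ∧
            V6 (top + ((h2 + 1 : Nat) : Int) + ((j : Int) + 1) * (-1),
                left + (ww : Int) + 1 + ((j : Int) + 1) * 0) = false := by
          intro j hj
          simp only [mul_neg_one, mul_zero, add_zero]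
          refine ⟨⟨by omega, by omega, by omega, by omega⟩, ?_⟩
          rw [Bool.eq_false_iff]
          intro hVt
          rw [hC3] at hVt
          simp only at hVt
          omega
        have hrun4 : ∀ out : List Char, _ := fun out =>
          run_straight m rows cols (-1) 0 3 dirs_at_3 (Or.inl (by norm_num))
            h2 ((h2 + 1) * ww + 1) V6 (top + ((h2 + 1 : Nat) : Int)) (left + (ww : Int) + 1)
            out hfree4
        rw [hrun4, show (top + ((h2 + 1 : Nat) : Int)) + (h2 : Int) * (-1) = top + 1 by
              push_cast; ring,
            show (left + (ww : Int) + 1) + (h2 : Int) * 0 = left + (ww : Int) + 1 by ring]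
        set path4 := (List.range h2).map
            (fun (j : Nat) => ((top + ((h2 + 1 : Nat) : Int) + (j : Int) * (-1),
              left + (ww : Int) + 1 + (j : Int) * 0) : Int × Int)) with hpath4
        set A4 := (List.range h2).map
            (fun (j : Nat) => matAt m (top + ((h2 + 1 : Nat) : Int) + (j : Int) * (-1))
              (left + (ww : Int) + 1 + (j : Int) * 0)) with hA4
        -- ··· corner (top+1, left+w): next (top, left+w) is visited, rotate to direction 0 (left)
        have hblock4 : ¬(0 ≤ top + 1 + (-1) ∧ top + 1 + (-1) < rows ∧
              0 ≤ left + (ww : Int) + 1 + 0 ∧ left + (ww : Int) + 1 + 0 < cols)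
            ∨ ((top + 1 + (-1), left + (ww : Int) + 1 + 0) : Int × Int)
                = (top + 1, left + (ww : Int) + 1)
            ∨ updMany V6 path4 (top + 1 + (-1), left + (ww : Int) + 1 + 0) = true := by
          refine Or.inr (Or.inr ?_)
          rw [updMany_spec]
          refine Or.inl ?_
          rw [hC3]
          exact ⟨⟨by omega, by omega, by omega, by omega⟩, Or.inr (Or.inl (by omega))⟩
        have hcorner4 : ∀ out : List Char, _ := fun out =>
          step_turn m rows cols ((h2 + 1) * ww) (updMany V6 path4) (top + 1)
            (left + (ww : Int) + 1) 3 out (-1) 0 0 (-1)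
            dirs_at_3 (by rw [mod4_3]; exact dirs_at_0) hblock4
        rw [hcorner4, mod4_3, show ((top : Int) + 1) + 0 = top + 1 by ring,
            show (left + (ww : Int) + 1) + (-1) = left + (ww : Int) by ring]
        set V8 := updV (updMany V6 path4) (top + 1, left + (ww : Int) + 1) with hV8def
        cases ww with
        | zero =>
          -- two columns: fuel is exhausted after the right column
          rw [show (h2 + 1) * 0 = 0 by ring]
          rw [show ∀ out : List Char, walkF m rows cols 0 V8 (top + 1)
                (left + ((0 : Nat) : Int)) 0 out = out from fun _ => rfl]
          rw [spiralA]
          rw [dif_pos (show top ≤ top + ((h2 + 1 + 1 : Nat) : Int)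
              ∧ left ≤ left + ((0 + 1 : Nat) : Int) from ⟨by omega, by omega⟩)]
          simp only [if_pos (show top + 1 ≤ top + ((h2 + 1 + 1 : Nat) : Int) by omega),
            if_pos (show left + 1 ≤ left + ((0 + 1 : Nat) : Int) by omega)]
          rw [spiralA]
          rw [dif_neg (show ¬ (top + 1 ≤ top + ((h2 + 1 + 1 : Nat) : Int) - 1
              ∧ left + 1 ≤ left + ((0 + 1 : Nat) : Int) - 1) from by rintro ⟨_, hx⟩; omega)]
          rw [pyRange_neg_one_split (left + ((0 + 1 : Nat) : Int)) left (by omega),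
            List.map_append]
          have hseg1 : (PySem.List.pyRange (left + ((0 + 1 : Nat) : Int)) left (-1)).map
              (fun c => matAt m top c) = A1 := by
            rw [PySem.List.pyRange_neg_one,
              show left + ((0 + 1 : Nat) : Int) - left = ((0 + 1 : Nat) : Int) by ring,
              Int.toNat_natCast, List.map_map, hA1]
            apply List.map_congr_left
            intro j hj
            simp only [Function.comp]
            congr 1 <;> ring
          rw [hseg1]
          rw [show (top : Int) + ((h2 + 1 + 1 : Nat) : Int) + 1
                = (top + ((h2 + 1 : Nat) : Int) + 1) + 1 by push_cast; ring,
            PySem.List.pyRange_one_succ_right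
              (by omega : top + 1 ≤ top + ((h2 + 1 : Nat) : Int) + 1), List.map_append]
          have hseg2 : (PySem.List.pyRange (top + 1) (top + ((h2 + 1 : Nat) : Int) + 1) 1).map
              (fun r => matAt m r left) = A2 := by
            rw [PySem.List.pyRange_one,
              show top + ((h2 + 1 : Nat) : Int) + 1 - (top + 1) = ((h2 + 1 : Nat) : Int) by ring,
              Int.toNat_natCast, List.map_map, hA2]
            apply List.map_congr_left
            intro j hj
            simp only [Function.comp]
            congr 1 <;> push_cast <;> ring
          rw [hseg2]
          rw [show left + ((0 + 1 : Nat) : Int) + 1 = (left + 1) + 1 by push_cast; ring,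
            PySem.List.pyRange_one_singleton (left + 1)]
          rw [show (top : Int) + ((h2 + 1 + 1 : Nat) : Int) - 1
                = top + ((h2 + 1 : Nat) : Int) by push_cast; ring]
          rw [pyRange_neg_one_split (top + ((h2 + 1 : Nat) : Int)) (top + 1)
              (by omega), List.map_append]
          have hseg4 : (PySem.List.pyRange (top + ((h2 + 1 : Nat) : Int)) (top + 1) (-1)).map
              (fun r => matAt m r (left + ((0 + 1 : Nat) : Int))) = A4 := by
            rw [PySem.List.pyRange_neg_one,
              show top + ((h2 + 1 : Nat) : Int) - (top + 1) = ((h2 : Nat) : Int) by push_cast; ring,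
              Int.toNat_natCast, List.map_map, hA4]
            apply List.map_congr_left
            intro j hj
            simp only [Function.comp]
            congr 1 <;> push_cast <;> ring
          rw [hseg4, hA3]
          push_cast
          ring_nf
          simp [List.append_assoc]
        | succ w2 =>
          -- ··· general case: recurse into the inner ring
          have hC4 : ∀ p : Int × Int, V8 p = true ↔
              ((0 ≤ p.1 ∧ p.1 < rows ∧ 0 ≤ p.2 ∧ p.2 < cols) ∧
               ¬(top + 1 ≤ p.1 ∧ p.1 ≤ top + 1 + (h2 : Int) ∧ left + 1 ≤ p.2
                  ∧ p.2 ≤ left + 1 + (w2 : Int))) := by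
            intro p
            obtain ⟨p1, p2⟩ := p
            rw [hV8def, updV_spec, updMany_spec, hC3]
            simp only [hpath4, List.mem_map, List.mem_range, Prod.mk.injEq, mul_neg_one,
              mul_zero, add_zero]
            constructor
            · rintro (⟨e1, e2⟩ | ⟨hg, hd'⟩ | ⟨j, hj, he1, he2⟩)
              · exact ⟨by omega, by omega⟩
              · exact ⟨hg, by omega⟩
              · exact ⟨by omega, by omega⟩
            · rintro ⟨hg, hni⟩
              by_cases houter : top ≤ p1 ∧ p1 ≤ top + ((h2 + 1 + 1 : Nat) : Int) ∧ left ≤ p2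
                  ∧ p2 ≤ left + ((w2 + 1 + 1 : Nat) : Int)
              · by_cases hp1t : p1 = top
                · exact Or.inr (Or.inl ⟨hg, Or.inr (Or.inl hp1t)⟩)
                · by_cases hp2l : p2 = left
                  · exact Or.inr (Or.inl ⟨hg, Or.inr (Or.inr (Or.inl hp2l))⟩)
                  · by_cases hp1b : p1 = top + ((h2 + 1 : Nat) : Int) + 1
                    · exact Or.inr (Or.inl ⟨hg, Or.inr (Or.inr (Or.inr hp1b))⟩)
                    · by_cases hp1c : p1 = top + 1
                      · exact Or.inl ⟨by omega, by omega⟩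
                      · exact Or.inr (Or.inr
                          ⟨(top + ((h2 + 1 : Nat) : Int) - p1).toNat, by omega, by omega,
                            by omega⟩)
              · exact Or.inr (Or.inl ⟨hg, Or.inl (by intro hr2; exact houter (by omega))⟩)
          have hlt : h2 + w2 < hw := by omega
          have hIH := fun (out : List Char) =>
            ih (h2 + w2) hlt h2 w2 (top + 1) (left + 1) V8 out (le_refl _) (by omega) (by omega)
              (by push_cast at hrows ⊢; omega) (by push_cast at hcols ⊢; omega) hC4
          rw [show (left + ((w2 + 1 : Nat) : Int) : Int) = (left + 1) + (w2 : Int) by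
            push_cast; ring]
          rw [hIH]
          conv_rhs => rw [spiralA]
          rw [dif_pos (show top ≤ top + ((h2 + 1 + 1 : Nat) : Int)
              ∧ left ≤ left + ((w2 + 1 + 1 : Nat) : Int) from ⟨by omega, by omega⟩)]
          simp only [if_pos (show top + 1 ≤ top + ((h2 + 1 + 1 : Nat) : Int) by omega),
            if_pos (show left + 1 ≤ left + ((w2 + 1 + 1 : Nat) : Int) by omega)]
          rw [pyRange_neg_one_split (left + ((w2 + 1 + 1 : Nat) : Int)) left (by omega),
            List.map_append]
          have hseg1 : (PySem.List.pyRange (left + ((w2 + 1 + 1 : Nat) : Int)) left (-1)).map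
              (fun c => matAt m top c) = A1 := by
            rw [PySem.List.pyRange_neg_one,
              show left + ((w2 + 1 + 1 : Nat) : Int) - left = ((w2 + 1 + 1 : Nat) : Int) by ring,
              Int.toNat_natCast, List.map_map, hA1]
            apply List.map_congr_left
            intro j hj
            simp only [Function.comp]
            congr 1 <;> ring
          rw [hseg1]
          rw [show (top : Int) + ((h2 + 1 + 1 : Nat) : Int) + 1
                = (top + ((h2 + 1 : Nat) : Int) + 1) + 1 by push_cast; ring,
            PySem.List.pyRange_one_succ_right
              (by omega : top + 1 ≤ top + ((h2 + 1 : Nat) : Int) + 1), List.map_append]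
          have hseg2 : (PySem.List.pyRange (top + 1) (top + ((h2 + 1 : Nat) : Int) + 1) 1).map
              (fun r => matAt m r left) = A2 := by
            rw [PySem.List.pyRange_one,
              show top + ((h2 + 1 : Nat) : Int) + 1 - (top + 1) = ((h2 + 1 : Nat) : Int) by ring,
              Int.toNat_natCast, List.map_map, hA2]
            apply List.map_congr_left
            intro j hj
            simp only [Function.comp]
            congr 1 <;> push_cast <;> ring
          rw [hseg2]
          rw [show left + ((w2 + 1 + 1 : Nat) : Int) + 1
                = (left + ((w2 + 1 : Nat) : Int) + 1) + 1 by push_cast; ring,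
            PySem.List.pyRange_one_succ_right
              (by omega : left + 1 ≤ left + ((w2 + 1 : Nat) : Int) + 1), List.map_append]
          have hseg3 : (PySem.List.pyRange (left + 1) (left + ((w2 + 1 : Nat) : Int) + 1) 1).map
              (fun c => matAt m (top + ((h2 + 1 + 1 : Nat) : Int)) c) = A3 := by
            rw [PySem.List.pyRange_one,
              show left + ((w2 + 1 : Nat) : Int) + 1 - (left + 1) = ((w2 + 1 : Nat) : Int) by ring,
              Int.toNat_natCast, List.map_map, hA3]
            apply List.map_congr_left
            intro j hj
            simp only [Function.comp]
            congr 1 <;> push_cast <;> ring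
          rw [hseg3]
          rw [show (top : Int) + ((h2 + 1 + 1 : Nat) : Int) - 1
                = top + ((h2 + 1 : Nat) : Int) by push_cast; ring]
          rw [pyRange_neg_one_split (top + ((h2 + 1 : Nat) : Int)) (top + 1) (by omega),
            List.map_append]
          have hseg4 : (PySem.List.pyRange (top + ((h2 + 1 : Nat) : Int)) (top + 1) (-1)).map
              (fun r => matAt m r (left + ((w2 + 1 + 1 : Nat) : Int))) = A4 := by
            rw [PySem.List.pyRange_neg_one,
              show top + ((h2 + 1 : Nat) : Int) - (top + 1) = ((h2 : Nat) : Int) by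
                push_cast; ring,
              Int.toNat_natCast, List.map_map, hA4]
            apply List.map_congr_left
            intro j hj
            simp only [Function.comp]
            congr 1 <;> push_cast <;> ring
          rw [hseg4]
          rw [show left + ((w2 + 1 + 1 : Nat) : Int) - 1 = (left + 1) + (w2 : Int) by
            push_cast; ring]
          congr 1
          push_cast
          ring_nf
          simp [List.append_assoc]
          constructor <;> (congr 1 <;> ring)

-- ===== VERDICT (by name: the statement is the Claim_ definition above) =====
theorem route_encrypt_spec : Claim_equal_route_encrypt := by
  unfold Claim_equal_route_encrypt Spec_route_encrypt
  intro text cols _clockwise _dom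
  simp only [route_encrypt, route_encrypt_alt]
  by_cases hc : cols = 0 ∨ cols ≤ 0
  · simp only [if_pos hc]
  · simp only [if_neg hc]
    have hcpos : 0 < cols := by push_neg at hc; omega
    set cs := (PySem.Str.upper (PySem.Str.replace text " " "")).toList with hcs
    set rows := PySem.Int.floordiv ((cs.length : Int) + cols - 1) cols with hrowsdef
    set M := pyBuildMatrix cs rows cols with hM
    have hrows0 : 0 ≤ rows := by
      rw [hrowsdef, PySem.Int.floordiv_eq_ediv_of_pos hcpos]
      exact Int.ediv_nonneg (by omega) (by omega)
    rw [walkB_eq_walkF M rows cols]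
    by_cases hr0 : rows = 0
    · rw [hr0]
      rw [show ((0 : Int) * cols).toNat = 0 by simp]
      rw [show walkF M 0 cols 0 (fun p => PySem.Set.contains PySem.Set.empty p) 0 (cols - 1) 0 []
            = [] from rfl]
      rw [spiralA]
      rw [dif_neg (show ¬ ((0 : Int) ≤ 0 - 1 ∧ (0 : Int) ≤ cols - 1) from by
        rintro ⟨hx, _⟩; omega)]
    · obtain ⟨h, hh⟩ : ∃ h : Nat, rows = (h : Int) + 1 := ⟨(rows - 1).toNat, by omega⟩
      obtain ⟨w, hwq⟩ : ∃ w : Nat, cols = (w : Int) + 1 := ⟨(cols - 1).toNat, by omega⟩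
      have hVempty : ∀ p : Int × Int,
          (fun q => PySem.Set.contains PySem.Set.empty q) p = true ↔
          ((0 ≤ p.1 ∧ p.1 < rows ∧ 0 ≤ p.2 ∧ p.2 < cols) ∧
           ¬((0 : Int) ≤ p.1 ∧ p.1 ≤ 0 + (h : Int) ∧ (0 : Int) ≤ p.2 ∧ p.2 ≤ 0 + (w : Int))) := by
        intro p
        rw [PySem.Set.contains_iff]
        constructor
        · intro hmem; exact absurd hmem (List.not_mem_nil)
        · rintro ⟨hg, hr⟩; exact absurd (by omega) hr
      have hring := ringLemma M rows cols (h + w) h w 0 0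
          (fun q => PySem.Set.contains PySem.Set.empty q) [] (le_refl _) (le_refl 0) (le_refl 0)
          (by omega) (by omega) hVempty
      rw [show (rows * cols).toNat = (h + 1) * (w + 1) from by
            rw [hh, hwq, show ((h : Int) + 1) * ((w : Int) + 1)
                  = (((h + 1) * (w + 1) : Nat) : Int) by push_cast; ring, Int.toNat_natCast],
          show cols - 1 = 0 + (w : Int) by omega,
          show rows - 1 = 0 + (h : Int) by omega]
      rw [show (0 + (w : Int) : Int) = 0 + (w : Int) from rfl]
      exact congrArg String.ofList hring.symm
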